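-- pv_equiv track=rewrite | github.com/e2718281689/DrumBin | app.py | compute_offsets
-- ===== SOURCE A (Python) =====
-- from typing import List, Tuple, Optional
--
-- def compute_offsets(files: List[Tuple[str, int]], align_bytes: int) -> List[int]:
--     """files: list[(path,size)] -> list[offset] from BIN start with alignment between items"""
--     offsets = []
--     acc = 0
--     for i, (_, size) in enumerate(files):
--         offsets.append(acc)
--         acc += size
--         if align_bytes > 1 and i < len(files) - 1:
--             pad = (-acc) % align_bytes
--             acc += pad
--     return offsets
-- ===== SOURCE B (Python) =====
-- from typing import List, Tuple
--
-- def compute_offsets(files: List[Tuple[str, int]], align_bytes: int) -> List[int]: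
--     """Map each size to its aligned size, then take prefix sums; drop the final total."""
--     aligned = [s + (-s) % align_bytes if align_bytes > 1 else s for _, s in files]
--     offsets = [0]
--     acc = 0
--     for s in aligned:
--         acc += s
--         offsets.append(acc)
--     return offsets[:len(files)]
-- ===== Notes on version B (the rewrite author's own statement) =====
-- stated objective: simpler
-- what changed: Replaces the enumerate loop with its last-element guard by a two-phase map-then-prefix-sum: each size is aligned independently (valid because every running offset is already aligned) and offsets are the prefix sums truncated to len(files).
import Mathlib
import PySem

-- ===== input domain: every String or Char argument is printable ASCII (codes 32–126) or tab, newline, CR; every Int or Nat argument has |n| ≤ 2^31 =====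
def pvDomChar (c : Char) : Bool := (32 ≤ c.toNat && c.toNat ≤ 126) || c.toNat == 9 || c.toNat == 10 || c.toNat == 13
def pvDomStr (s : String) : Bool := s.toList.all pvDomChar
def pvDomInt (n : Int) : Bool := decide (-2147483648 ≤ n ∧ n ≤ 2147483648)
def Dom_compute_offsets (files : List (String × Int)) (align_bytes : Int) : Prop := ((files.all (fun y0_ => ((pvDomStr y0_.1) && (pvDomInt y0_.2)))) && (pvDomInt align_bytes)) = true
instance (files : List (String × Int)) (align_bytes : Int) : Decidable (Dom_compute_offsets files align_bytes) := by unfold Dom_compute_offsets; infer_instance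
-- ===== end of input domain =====

-- B computes the same offsets by aligning each size up front and taking prefix sums (simpler decomposition, same cost).

-- ===== PORT A =====
-- literal port of A's enumerate loop: append acc, add size, pad acc unless last item
def compute_offsets (files : List (String × Int)) (align_bytes : Int) : List Int :=
  ((PySem.List.enumerate files 0).foldl
    (fun (st : List Int × Int) p =>
      let offsets := st.1 ++ [st.2]
      let acc := st.2 + p.2.2
      if align_bytes > 1 ∧ p.1 < (files.length : Int) - 1 then
        (offsets, acc + PySem.Int.mod (-acc) align_bytes)
      else (offsets, acc))
    ([], 0)).1

-- ===== PORT B =====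
-- literal port of Source B: map each size to its aligned size, prefix-sum, truncate
def compute_offsets_alt (files : List (String × Int)) (align_bytes : Int) : List Int :=
  let aligned := files.map (fun p =>
    if align_bytes > 1 then p.2 + PySem.Int.mod (-p.2) align_bytes else p.2)
  ((aligned.foldl (fun (st : List Int × Int) s => (st.1 ++ [st.2 + s], st.2 + s)) ([0], 0)).1).take files.length

-- ===== PRECONDITION & SPEC =====
def Spec_compute_offsets (files : List (String × Int)) (align_bytes : Int) (out : List Int) : Prop := out = compute_offsets_alt files align_bytes
instance (files : List (String × Int)) (align_bytes : Int) (out : List Int) : Decidable (Spec_compute_offsets files align_bytes out) := by unfold Spec_compute_offsets; infer_instance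

-- ===== CLAIM (what is proved, stated in full; the proofs are below) =====
def Claim_equal_compute_offsets : Prop := ∀ (files : List (String × Int)) (align_bytes : Int), Dom_compute_offsets files align_bytes → Spec_compute_offsets files align_bytes (compute_offsets files align_bytes)

-- ===== LEMMAS AND PROOFS =====

-- reference: the offsets list as a simple recursion over the (already aligned) sizes
def pvOfs : List Int → Int → List Int
  | [], _ => []
  | s :: rest, acc => acc :: pvOfs rest (acc + s)

-- running sums (what B's fold accumulates after the initial [0])
def pvSums : List Int → Int → List Int
  | [], _ => []
  | s :: rest, acc => (acc + s) :: pvSums rest (acc + s)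

-- the per-item aligned size used by B
def pvAl (align_bytes : Int) (p : String × Int) : Int :=
  if align_bytes > 1 then p.2 + PySem.Int.mod (-p.2) align_bytes else p.2

lemma pvB_fold (align_bytes : Int) :
    ∀ (l : List Int) (os : List Int) (acc : Int),
      (l.foldl (fun (st : List Int × Int) s => (st.1 ++ [st.2 + s], st.2 + s)) (os, acc)).1
        = os ++ pvSums l acc := by
  intro l
  induction l with
  | nil => intro os acc; simp [pvSums]
  | cons s rest ih =>
      intro os acc
      simp only [List.foldl_cons, pvSums]
      rw [ih]
      simp

lemma pvTake_sums : ∀ (l : List Int) (acc : Int),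
    (acc :: pvSums l acc).take l.length = pvOfs l acc := by
  intro l
  induction l with
  | nil => intro acc; simp [pvOfs]
  | cons s rest ih =>
      intro acc
      simp only [pvSums, pvOfs, List.length_cons, List.take_succ_cons]
      exact congrArg _ (ih (acc + s))

lemma pvMod_shift (align s acc : Int) (h : 1 < align) (hd : align ∣ acc) :
    PySem.Int.mod (-(acc + s)) align = PySem.Int.mod (-s) align := by
  rw [PySem.Int.mod_eq_emod_of_pos (by omega), PySem.Int.mod_eq_emod_of_pos (by omega)]
  obtain ⟨t, ht⟩ := hd
  have h2 : -(acc + s) = -s + align * -t := by rw [ht]; ring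
  rw [h2, Int.add_mul_emod_self_left]

lemma pvDvd_pad (align a : Int) (h : 1 < align) :
    align ∣ (a + PySem.Int.mod (-a) align) := by
  rw [PySem.Int.mod_eq_emod_of_pos (by omega)]
  have hq := Int.emod_add_mul_ediv (-a) align
  refine ⟨-((-a) / align), ?_⟩
  rw [mul_neg]
  linarith [hq]

lemma pvA_fold (align_bytes : Int) (N : Nat) :
    ∀ (l : List (String × Int)) (k : Nat) (os : List Int) (acc : Int),
      k + l.length = N → (1 < align_bytes → align_bytes ∣ acc) →
      ((PySem.List.enumerate l (k : Int)).foldl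
        (fun (st : List Int × Int) p =>
          let offsets := st.1 ++ [st.2]
          let acc := st.2 + p.2.2
          if align_bytes > 1 ∧ p.1 < (N : Int) - 1 then
            (offsets, acc + PySem.Int.mod (-acc) align_bytes)
          else (offsets, acc))
        (os, acc)).1
        = os ++ pvOfs (l.map (pvAl align_bytes)) acc := by
  intro l
  induction l with
  | nil => intro k os acc _ _; simp [PySem.List.enumerate_nil, pvOfs]
  | cons p rest ih =>
      intro k os acc hk hd
      rw [PySem.List.enumerate_cons]
      simp only [List.foldl_cons, List.map_cons, pvOfs]
      by_cases hal : 1 < align_bytes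
      · cases rest with
        | nil =>
            -- last item: the guard i < N - 1 is false (k = N - 1)
            simp only [List.length_cons, List.length_nil] at hk
            have hcond : ¬ ((align_bytes > 1) ∧ ((k : Int)) < (N : Int) - 1) := by
              rintro ⟨-, hlt⟩; omega
            simp only [if_neg hcond]
            simp [PySem.List.enumerate_nil, pvOfs, pvAl]
        | cons q rest' =>
            have hcond : (align_bytes > 1) ∧ ((k : Int)) < (N : Int) - 1 := by
              constructor
              · exact hal
              · have : k + (rest'.length + 1 + 1) = N := by
                  simpa [Nat.add_comm, Nat.add_assoc] using hk
                omega
            simp only [if_pos hcond]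
            have hstep : acc + p.2 + PySem.Int.mod (-(acc + p.2)) align_bytes
                = acc + pvAl align_bytes p := by
              rw [pvMod_shift align_bytes p.2 acc hal (hd hal)]
              simp [pvAl, hal, add_assoc]
            rw [hstep]
            have hdvd : 1 < align_bytes → align_bytes ∣ (acc + pvAl align_bytes p) := by
              intro h
              have h1 := pvDvd_pad align_bytes (acc + p.2) h
              have : acc + pvAl align_bytes p
                  = acc + p.2 + PySem.Int.mod (-(acc + p.2)) align_bytes := by
                rw [pvMod_shift align_bytes p.2 acc h (hd h)]; simp [pvAl, h, add_assoc]
              rw [this]; exact h1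
            have hk' : (k + 1) + (q :: rest').length = N := by
              simpa [Nat.add_comm, Nat.add_assoc] using hk
            have := ih (k + 1) (os ++ [acc]) (acc + pvAl align_bytes p) hk' hdvd
            rw [show ((k : Int) + 1) = ((k + 1 : Nat) : Int) by push_cast; ring] at *
            rw [this]
            simp
      · -- no alignment: the guard is false on every item
        have hcond : ¬ ((align_bytes > 1) ∧ ((k : Int)) < (N : Int) - 1) := by
          rintro ⟨h1, -⟩; exact hal h1
        simp only [if_neg hcond]
        have hk' : (k + 1) + rest.length = N := by simp [List.length_cons] at hk; omega
        have := ih (k + 1) (os ++ [acc]) (acc + p.2) hk' (fun h => absurd h hal)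
        rw [show ((k : Int) + 1) = ((k + 1 : Nat) : Int) by push_cast; ring] at *
        rw [this]
        simp [pvAl, hal]

-- ===== VERDICT (by name: the statement is the Claim_ definition above) =====
theorem compute_offsets_spec : Claim_equal_compute_offsets := by
  intro files align_bytes _
  unfold Spec_compute_offsets compute_offsets compute_offsets_alt
  have hA := pvA_fold align_bytes files.length files 0 [] 0 (by simp) (fun _ => dvd_zero _)
  simp only [Nat.cast_zero] at hA
  rw [hA]
  have hB := pvB_fold align_bytes (files.map (fun p =>
      if align_bytes > 1 then p.2 + PySem.Int.mod (-p.2) align_bytes else p.2)) [0] 0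
  simp only [hB]
  have hlen : files.length
      = (files.map (fun p => if align_bytes > 1 then p.2 + PySem.Int.mod (-p.2) align_bytes else p.2)).length := by
    simp
  rw [hlen, List.singleton_append, pvTake_sums]
  rfl
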